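-- pv_equiv track=rewrite | github.com/lucasgattas/comfyui-egregora-tiled | egregora_core_tiling.py | _grid_fit_inside
-- ===== SOURCE A (Python) =====
-- def _grid_fit_inside(H: int, W: int, th: int, tw: int, overlap: int):
--     th = int(th); tw = int(tw); overlap = int(max(0, overlap))
--     step_h = max(1, th - overlap)
--     step_w = max(1, tw - overlap)
--
--     ys = [0]
--     while ys[-1] + th + step_h <= H:
--         ys.append(ys[-1] + step_h)
--     if ys[-1] + th < H:
--         last = max(0, H - th)
--         if last != ys[-1]:
--             ys.append(last)
--
--     xs = [0]
--     while xs[-1] + tw + step_w <= W: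
--         xs.append(xs[-1] + step_w)
--     if xs[-1] + tw < W:
--         last = max(0, W - tw)
--         if last != xs[-1]:
--             xs.append(last)
--
--     rows, cols = len(ys), len(xs)
--     origins = [(y, x) for y in ys for x in xs]
--     return rows, cols, origins
-- ===== SOURCE B (Python) =====
-- def _grid_fit_inside(H: int, W: int, th: int, tw: int, overlap: int):
--     th = int(th); tw = int(tw); overlap = int(max(0, overlap))
--
--     def axis(L, t):
--         step = max(1, t - overlap)
--         d = L - t
--         if d <= 0:
--             return [0]
--         K = d // step
--         vs = [k * step for k in range(K + 1)]
--         if K * step < d: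
--             vs.append(d)
--         return vs
--
--     ys = axis(H, th)
--     xs = axis(W, tw)
--     return len(ys), len(xs), [(y, x) for y in ys for x in xs]
-- ===== Notes on version B (the rewrite author's own statement) =====
-- stated objective: simpler
-- what changed: Each axis's incremental while-append plus de-dup boundary logic is replaced by a closed-form tile count K=(L-t)//step with a range comprehension and a single boundary test, shared by both axes via one helper.
import Mathlib
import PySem

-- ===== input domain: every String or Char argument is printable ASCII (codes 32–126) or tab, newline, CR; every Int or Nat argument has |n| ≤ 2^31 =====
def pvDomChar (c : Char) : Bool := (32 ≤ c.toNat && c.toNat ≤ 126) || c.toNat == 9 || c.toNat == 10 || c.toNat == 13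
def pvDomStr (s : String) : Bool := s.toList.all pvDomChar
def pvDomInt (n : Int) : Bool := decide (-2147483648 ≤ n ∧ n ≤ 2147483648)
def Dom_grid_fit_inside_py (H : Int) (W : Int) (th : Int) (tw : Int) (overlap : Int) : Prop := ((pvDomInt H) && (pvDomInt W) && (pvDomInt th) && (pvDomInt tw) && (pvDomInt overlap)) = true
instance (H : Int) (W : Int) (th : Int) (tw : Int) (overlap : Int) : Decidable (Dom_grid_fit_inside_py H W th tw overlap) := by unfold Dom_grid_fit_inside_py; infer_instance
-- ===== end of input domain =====

-- B replaces A's incremental while-append per axis by a closed-form count (K = (L-t)//step)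
-- and a range comprehension, plus the boundary tail; objective: simpler.

-- ===== PORT A =====
-- the while loop: append last+step while last + t + step ≤ bound (ys kept, last = ys[-1])
def pvLoopA (bound t step : Int) (hstep : 1 ≤ step) (ys : List Int) (last : Int) :
    List Int × Int :=
  if _h : last + t + step ≤ bound then
    pvLoopA bound t step hstep (ys ++ [last + step]) (last + step)
  else (ys, last)
termination_by (bound - t - last).toNat
decreasing_by omega

-- one axis of A: the while loop, then the boundary append
def pvAxisA (bound t step : Int) (hstep : 1 ≤ step) : List Int :=
  match pvLoopA bound t step hstep [0] 0 with
  | (ys, last) =>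
    if last + t < bound then
      let l := max 0 (bound - t)
      if l ≠ last then ys ++ [l] else ys
    else ys

def grid_fit_inside_py (H : Int) (W : Int) (th : Int) (tw : Int) (overlap : Int) :
    Int × Int × (List (Int × Int)) :=
  let ov := max 0 overlap
  let step_h := max 1 (th - ov)
  let step_w := max 1 (tw - ov)
  let ys := pvAxisA H th step_h (le_max_left 1 _)
  let xs := pvAxisA W tw step_w (le_max_left 1 _)
  ((ys.length : Int), (xs.length : Int),
    ys.flatMap (fun y => xs.map (fun x => (y, x))))

-- ===== PORT B =====
-- one axis of B: closed-form count K, range comprehension, boundary tail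
def pvAxisB (overlap L t : Int) : List Int :=
  let step := max 1 (t - overlap)
  let d := L - t
  if d ≤ 0 then [0]
  else
    let K := PySem.Int.floordiv d step
    let vs := (PySem.List.pyRange 0 (K + 1) 1).map (fun k => k * step)
    if K * step < d then vs ++ [d] else vs

def grid_fit_inside_py_alt (H : Int) (W : Int) (th : Int) (tw : Int) (overlap : Int) :
    Int × Int × (List (Int × Int)) :=
  let ov := max 0 overlap
  let ys := pvAxisB ov H th
  let xs := pvAxisB ov W tw
  ((ys.length : Int), (xs.length : Int),
    ys.flatMap (fun y => xs.map (fun x => (y, x))))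

-- ===== PRECONDITION & SPEC =====
def Spec_grid_fit_inside_py (H : Int) (W : Int) (th : Int) (tw : Int) (overlap : Int)
    (out : Int × Int × (List (Int × Int))) : Prop :=
  out = grid_fit_inside_py_alt H W th tw overlap
instance (H : Int) (W : Int) (th : Int) (tw : Int) (overlap : Int)
    (out : Int × Int × (List (Int × Int))) :
    Decidable (Spec_grid_fit_inside_py H W th tw overlap out) := by
  unfold Spec_grid_fit_inside_py; infer_instance

-- ===== CLAIM =====
def Claim_equal_grid_fit_inside_py : Prop :=
  ∀ (H : Int) (W : Int) (th : Int) (tw : Int) (overlap : Int),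
    Dom_grid_fit_inside_py H W th tw overlap →
    Spec_grid_fit_inside_py H W th tw overlap (grid_fit_inside_py H W th tw overlap)

-- ===== LEMMAS AND PROOFS =====

-- the list of values appended by A's while loop after `last`
def pvRamp (last step : Int) (n : Nat) : List Int :=
  (List.range n).map (fun (i : Nat) => last + ((i : Int) + 1) * step)

theorem pvRamp_succ (last step : Int) (m : Nat) :
    pvRamp last step (m + 1) = (last + step) :: pvRamp (last + step) step m := by
  simp only [pvRamp, List.range_succ_eq_map, List.map_cons, List.map_map]
  refine List.cons_eq_cons.mpr ⟨by push_cast; ring, ?_⟩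
  apply List.map_congr_left; intro i _; simp only [Function.comp]; push_cast; ring

-- characterisation of A's while loop: it appends exactly
-- n = ((bound - t - last) // step).toNat values, ending at last + n*step
theorem pvLoopA_eq (bound t step : Int) (hstep : 1 ≤ step) (ys : List Int) (last : Int) :
    pvLoopA bound t step hstep ys last =
      (ys ++ pvRamp last step ((PySem.Int.floordiv (bound - t - last) step).toNat),
       last + ((PySem.Int.floordiv (bound - t - last) step).toNat : Int) * step) := by
  fun_induction pvLoopA bound t step hstep ys last with
  | case1 ys last h ih =>
    have hpos : (0:Int) < step := by omega
    rw [PySem.Int.floordiv_eq_ediv_of_pos hpos] at *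
    have hdiv : (bound - t - last) / step = (bound - t - (last + step)) / step + 1 := by
      have he : bound - t - last = (bound - t - (last + step)) + 1 * step := by ring
      rw [he, Int.add_mul_ediv_right _ _ (by omega : step ≠ 0)]
    have hnn : 0 ≤ (bound - t - (last + step)) / step :=
      Int.ediv_nonneg (by omega) (by omega)
    set m : Nat := ((bound - t - (last + step)) / step).toNat with hm
    have hmv : (bound - t - (last + step)) / step = (m : Int) := by omega
    have hN : ((bound - t - last) / step).toNat = m + 1 := by omega
    rw [ih, hN, pvRamp_succ]
    simp only [Prod.mk.injEq]
    refine ⟨by simp, by push_cast; ring⟩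
  | case2 ys last h =>
    have hpos : (0:Int) < step := by omega
    rw [PySem.Int.floordiv_eq_ediv_of_pos hpos]
    have hlt : (bound - t - last) / step < 1 :=
      Int.ediv_lt_of_lt_mul hpos (by omega)
    have hz : ((bound - t - last) / step).toNat = 0 := by omega
    simp [hz, pvRamp]

-- B's range comprehension is 0 followed by A's ramp
theorem pvRange_mul_eq_ramp (step : Int) (n : Nat) :
    ((List.range (n + 1)).map (fun (k : Nat) => ((k : Int)) * step)) = 0 :: pvRamp 0 step n := by
  simp only [List.range_succ_eq_map, List.map_cons, List.map_map, pvRamp]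
  refine List.cons_eq_cons.mpr ⟨by simp, ?_⟩
  apply List.map_congr_left; intro i _; simp only [Function.comp]; push_cast; ring

-- the two axis computations agree (overlap already clamped nonnegative)
theorem pvAxis_eq (overlap L t : Int) :
    pvAxisA L t (max 1 (t - overlap)) (le_max_left 1 _) = pvAxisB overlap L t := by
  set step := max 1 (t - overlap) with hs
  have hstep : 1 ≤ step := le_max_left 1 _
  have hpos : (0:Int) < step := by omega
  unfold pvAxisA pvAxisB
  rw [pvLoopA_eq]
  simp only [← hs, show L - t - 0 = L - t from by ring]
  rw [PySem.Int.floordiv_eq_ediv_of_pos hpos]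
  set d : Int := L - t with hd
  by_cases hdle : d ≤ 0
  · -- d ≤ 0 : loop never runs and the boundary test fails on both sides
    have hdivle : d / step ≤ 0 := by
      have h0 : d / step ≤ 0 / step := Int.ediv_le_ediv hpos hdle
      simpa using h0
    have hz : (d / step).toNat = 0 := by omega
    rw [hz]
    simp only [pvRamp, List.range_zero, List.map_nil, List.append_nil,
      Nat.cast_zero, zero_mul, add_zero, if_pos hdle]
    rw [if_neg (by omega : ¬ (0 + t < L))]
  · -- d > 0 : K = d / step tiles beyond the origin, then the boundary tile iff K*step < d
    have hdpos : 0 < d := by omega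
    have hKnn : 0 ≤ d / step := Int.ediv_nonneg (by omega) (by omega)
    set K : Int := d / step with hK
    have hKle : K * step ≤ d := Int.ediv_mul_le d (by omega)
    have hKcast : ((K.toNat : Int)) = K := by omega
    have hn1 : (K + 1 - 0).toNat = K.toNat + 1 := by omega
    have hcast : (K + 1 : Int) = ((K.toNat + 1 : Nat) : Int) := by omega
    rw [if_neg hdle, hcast, PySem.List.pyRange_zero_natCast, List.map_map]
    have hmaps : (List.range (K.toNat + 1)).map ((fun k => k * step) ∘ (fun (k : Nat) => (k : Int)))
        = (List.range (K.toNat + 1)).map (fun (k : Nat) => ((k : Int)) * step) := rfl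
    rw [hmaps, pvRange_mul_eq_ramp, hKcast]
    have hmax : max 0 (L - t) = d := by omega
    by_cases hlt : K * step < d
    · rw [if_pos (by omega : 0 + K * step + t < L), if_pos hlt,
        if_pos (by rw [hmax]; omega : max 0 (L - t) ≠ 0 + K * step)]
      rw [hmax]; simp
    · rw [if_neg (by omega : ¬ (0 + K * step + t < L)), if_neg hlt]
      simp

-- ===== VERDICT (by name: the statement is the Claim_ definition above) =====
theorem grid_fit_inside_py_spec : Claim_equal_grid_fit_inside_py := by
  intro H W th tw overlap _
  unfold Spec_grid_fit_inside_py
  simp only [grid_fit_inside_py, grid_fit_inside_py_alt, pvAxis_eq]
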